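-- pv_equiv track=rewrite | github.com/novelcore/EU_ORBIS | utils/kg_prompts.py | process_target_node
-- ===== SOURCE A (Python) =====
-- def process_target_node(node2:str=None, edge:str=None):
--     """Process the target node to find common text in node2 and edge.
--
--     Args:
--         node2 (str): The target node.
--         edge (str): The edge string.
--
--     Returns:
--         str: The processed node2 with common text removed.
--     """
--     text, common = "", ""
--     for part in node2.split(" "):
--         if len(text) == 0:
--             text = part
--         else:
--             text = text + " " + part
--
--         if text in edge:
--             common = text
--
--     return node2.replace(common,"")
-- ===== SOURCE B (Python) =====
-- def process_target_node(node2: str = None, edge: str = None):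
--     """Same result as A: remove the longest space-separated prefix of node2
--     that occurs in edge, via binary search instead of a linear accumulation."""
--     words = node2.split(" ")
--     # Leading empty words (leading spaces) never extend any candidate prefix.
--     while words and words[0] == "":
--         words.pop(0)
--     lo, hi = 0, len(words)
--     # P(k) = ' '.join(words[:k]) in edge is downward closed: binary-search the largest k.
--     while lo < hi:
--         mid = (lo + hi + 1) // 2
--         if " ".join(words[:mid]) in edge:
--             lo = mid
--         else:
--             hi = mid - 1
--     return node2.replace(" ".join(words[:lo]), "")
-- ===== Notes on version B (the rewrite author's own statement) =====
-- stated objective: alternative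
-- what changed: Replaces A's linear accumulation over every word-prefix with a binary search for the largest k such that ' '.join(words[:k]) occurs in edge, exploiting that the property is downward closed; leading empty words are dropped once up front instead of being re-detected by the len(text)==0 test each iteration.
import Mathlib
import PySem

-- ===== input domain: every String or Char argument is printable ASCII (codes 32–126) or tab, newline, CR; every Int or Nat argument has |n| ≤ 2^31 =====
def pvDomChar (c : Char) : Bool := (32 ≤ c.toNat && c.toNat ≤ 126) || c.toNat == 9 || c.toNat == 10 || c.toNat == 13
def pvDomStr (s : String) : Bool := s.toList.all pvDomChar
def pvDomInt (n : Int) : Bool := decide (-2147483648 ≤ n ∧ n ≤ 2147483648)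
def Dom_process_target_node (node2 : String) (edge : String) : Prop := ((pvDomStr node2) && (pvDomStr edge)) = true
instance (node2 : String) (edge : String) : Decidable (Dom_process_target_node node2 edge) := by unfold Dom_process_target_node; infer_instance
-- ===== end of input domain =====

-- ===== PORT A =====
-- B removes A's linear prefix accumulation in favour of a binary search over word counts; return values proved equal.
-- Port of A works on .toList via PySem.Chars (exact wrappers for split/in/replace).
def pvStepA (e : List Char) (tc : List Char × List Char) (part : List Char) : List Char × List Char :=
  let text := if PySem.Chars.len tc.1 = 0 then part else tc.1 ++ [' '] ++ part
  (text, if PySem.Chars.isIn text e then text else tc.2)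

def process_target_node (node2 : String) (edge : String) : String :=
  let tc := (PySem.Chars.splitOn node2.toList [' ']).foldl (pvStepA edge.toList) ([], [])
  String.ofList (PySem.Chars.replace node2.toList tc.2 [])

-- ===== PORT B =====
-- " ".join(words[:k])
def pvJoinTake (ws : List (List Char)) (k : Nat) : List Char :=
  PySem.Chars.join [' '] (ws.take k)

-- Source B's binary-search loop (mid = (lo+hi+1)//2 written inline)
def pvSearch (e : List Char) (ws : List (List Char)) (lo hi : Nat) : Nat :=
  if h : lo < hi then
    if PySem.Chars.isIn (pvJoinTake ws ((lo + hi + 1) / 2)) e then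
      pvSearch e ws ((lo + hi + 1) / 2) hi
    else
      pvSearch e ws lo ((lo + hi + 1) / 2 - 1)
  else lo
termination_by hi - lo
decreasing_by all_goals omega

def process_target_node_alt (node2 : String) (edge : String) : String :=
  -- words = node2.split(" "); the while/pop loop dropping leading "" words is List.dropWhile
  let ws := (PySem.Chars.splitOn node2.toList [' ']).dropWhile (fun w => w == [])
  let lo := pvSearch edge.toList ws 0 ws.length
  String.ofList (PySem.Chars.replace node2.toList (pvJoinTake ws lo) [])

-- ===== PRECONDITION & SPEC =====
def Spec_process_target_node (node2 : String) (edge : String) (out : String) : Prop := out = process_target_node_alt node2 edge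
instance (node2 : String) (edge : String) (out : String) : Decidable (Spec_process_target_node node2 edge out) := by unfold Spec_process_target_node; infer_instance

-- ===== CLAIM (what is proved, stated in full; the proofs are below) =====
def Claim_equal_process_target_node : Prop := ∀ (node2 : String) (edge : String), Dom_process_target_node node2 edge → Spec_process_target_node node2 edge (process_target_node node2 edge)

-- ===== LEMMAS AND PROOFS =====

theorem pvJoin_cons_ne (s w : List Char) (T : List (List Char)) (hT : T ≠ []) :
    PySem.Chars.join s (w :: T) = w ++ s ++ PySem.Chars.join s T := by
  cases T with
  | nil => exact absurd rfl hT
  | cons y ys => exact PySem.Chars.join_cons_cons s w y ys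

theorem pvJoin_take_prefix (s : List Char) (ws : List (List Char)) (m : Nat) :
    PySem.Chars.join s (ws.take m) <+: PySem.Chars.join s ws := by
  induction ws generalizing m with
  | nil => simp
  | cons w l ih =>
    cases m with
    | zero => simp [PySem.Chars.join_nil]
    | succ m =>
      cases l with
      | nil => simp
      | cons y ys =>
        cases m with
        | zero =>
          simp only [List.take_succ_cons, List.take_zero, PySem.Chars.join_singleton,
            PySem.Chars.join_cons_cons]
          exact ⟨s ++ PySem.Chars.join s (y :: ys), by simp⟩
        | succ m =>
          simp only [List.take_succ_cons]
          rw [pvJoin_cons_ne s w (y :: List.take m ys) (by simp),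
            pvJoin_cons_ne s w (y :: ys) (by simp)]
          have h := ih (m + 1)
          simp only [List.take_succ_cons] at h
          obtain ⟨t, ht⟩ := h
          exact ⟨t, by simp [← ht]⟩

theorem pvMono (e : List Char) (ws : List (List Char)) {m k : Nat} (h : m ≤ k)
    (hk : PySem.Chars.isIn (pvJoinTake ws k) e = true) :
    PySem.Chars.isIn (pvJoinTake ws m) e = true := by
  rw [PySem.Chars.isIn_iff_infix] at hk ⊢
  have hp := pvJoin_take_prefix [' '] (ws.take k) m
  rw [List.take_take, Nat.min_eq_left h] at hp
  exact (List.IsPrefix.isInfix hp).trans hk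

theorem pvSearch_spec (e : List Char) (ws : List (List Char)) :
    ∀ n lo hi, hi - lo ≤ n → lo ≤ hi → hi ≤ ws.length →
    PySem.Chars.isIn (pvJoinTake ws lo) e = true →
    (∀ m, hi < m → m ≤ ws.length → PySem.Chars.isIn (pvJoinTake ws m) e = false) →
    PySem.Chars.isIn (pvJoinTake ws (pvSearch e ws lo hi)) e = true ∧
      pvSearch e ws lo hi ≤ ws.length ∧
      (∀ m, pvSearch e ws lo hi < m → m ≤ ws.length →
        PySem.Chars.isIn (pvJoinTake ws m) e = false) := by
  intro n
  induction n with
  | zero =>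
    intro lo hi hn hlh hhl hP hmax
    have : ¬ lo < hi := by omega
    rw [pvSearch, dif_neg this]
    exact ⟨hP, by omega, fun m hm hml => hmax m (by omega) hml⟩
  | succ n ih =>
    intro lo hi hn hlh hhl hP hmax
    rw [pvSearch]
    by_cases h : lo < hi
    · rw [dif_pos h]
      by_cases hc : PySem.Chars.isIn (pvJoinTake ws ((lo + hi + 1) / 2)) e = true
      · rw [if_pos hc]
        exact ih ((lo + hi + 1) / 2) hi (by omega) (by omega) hhl hc hmax
      · rw [if_neg hc]
        refine ih lo ((lo + hi + 1) / 2 - 1) (by omega) (by omega) (by omega) hP ?_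
        intro m hm hml
        by_cases hmh : hi < m
        · exact hmax m hmh hml
        · by_contra h'
          exact hc (pvMono e ws (by omega) (Bool.of_not_eq_false h'))
    · rw [dif_neg h]
      exact ⟨hP, by omega, fun m hm hml => hmax m (by omega) hml⟩

theorem pvFoldNil (e : List Char) (l : List (List Char)) (h : ∀ w ∈ l, w = []) :
    l.foldl (pvStepA e) ([], []) = ([], []) := by
  induction l with
  | nil => rfl
  | cons w l ih =>
    have hw : w = [] := h w (List.mem_cons_self ..)
    have hstep : pvStepA e ([], []) w = ([], []) := by
      subst hw
      simp only [pvStepA]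
      split <;> simp_all [PySem.Chars.len]
    rw [List.foldl_cons, hstep]
    exact ih fun w hwl => h w (List.mem_cons_of_mem _ hwl)

theorem pvHeadPrefix (s d : List Char) (l : List (List Char)) :
    d <+: PySem.Chars.join s (d :: l) := by
  cases l with
  | nil => simp
  | cons y ys =>
    rw [PySem.Chars.join_cons_cons]
    exact ⟨s ++ PySem.Chars.join s (y :: ys), by simp⟩

theorem pvJoinTake_ne (d : List Char) (hd : d ≠ []) (l : List (List Char)) (m : Nat)
    (hm : 1 ≤ m) : pvJoinTake (d :: l) m ≠ [] := by
  obtain ⟨m, rfl⟩ : ∃ m', m = m' + 1 := ⟨m - 1, by omega⟩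
  simp only [pvJoinTake, List.take_succ_cons]
  intro hnil
  have := pvHeadPrefix [' '] d (l.take m)
  rw [hnil] at this
  exact hd (List.prefix_nil.mp this)

theorem pvJoin_take_succ (s : List Char) (ws : List (List Char)) (i : Nat)
    (h1 : 1 ≤ i) (h2 : i < ws.length) (hi : i < ws.length) :
    PySem.Chars.join s (ws.take (i + 1)) = PySem.Chars.join s (ws.take i) ++ s ++ ws[i] := by
  induction ws generalizing i with
  | nil => simp at h2
  | cons w l ih =>
    obtain ⟨j, rfl⟩ : ∃ j, i = j + 1 := ⟨i - 1, by omega⟩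
    cases j with
    | zero =>
      cases l with
      | nil => simp at h2
      | cons y ys =>
        simp [PySem.Chars.join_cons_cons, PySem.Chars.join_singleton]
    | succ j =>
      have hl : j + 1 < l.length := by simpa using h2
      have hlne : l ≠ [] := by rintro rfl; simp at hl
      have ht1 : l.take (j + 1 + 1) ≠ [] := by
        intro h; have := congrArg List.length h; rw [List.length_take, List.length_nil] at this; omega
      have ht2 : l.take (j + 1) ≠ [] := by
        intro h; have := congrArg List.length h; rw [List.length_take, List.length_nil] at this; omega
      simp only [List.take_succ_cons, List.getElem_cons_succ]
      rw [pvJoin_cons_ne s w (l.take (j + 1 + 1)) ht1,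
        pvJoin_cons_ne s w (l.take (j + 1)) ht2,
        ih (j + 1) (by omega) hl hl]
      simp

theorem pvJoinTake_succ (ws : List (List Char)) (i : Nat) (h1 : 1 ≤ i)
    (h2 : i < ws.length) : pvJoinTake ws (i + 1) = pvJoinTake ws i ++ [' '] ++ ws[i] :=
  pvJoin_take_succ [' '] ws i h1 h2 h2

theorem pvFold_spec (e : List Char) (d : List Char) (hd : d ≠ []) (l : List (List Char)) :
    ∀ n i b, (d :: l).length - i ≤ n → 1 ≤ i → i ≤ (d :: l).length → b ≤ i →
    PySem.Chars.isIn (pvJoinTake (d :: l) b) e = true →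
    (∀ m, b < m → m ≤ i → PySem.Chars.isIn (pvJoinTake (d :: l) m) e = false) →
    ∃ K, K ≤ (d :: l).length ∧ PySem.Chars.isIn (pvJoinTake (d :: l) K) e = true ∧
      (∀ m, K < m → m ≤ (d :: l).length → PySem.Chars.isIn (pvJoinTake (d :: l) m) e = false) ∧
      (((d :: l).drop i).foldl (pvStepA e) (pvJoinTake (d :: l) i, pvJoinTake (d :: l) b)).2
        = pvJoinTake (d :: l) K := by
  intro n
  induction n with
  | zero =>
    intro i b hn h1 h2 hb hP hmax
    have hi : i = (d :: l).length := by omega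
    refine ⟨b, by omega, hP, ?_, ?_⟩
    · intro m hm hml; exact hmax m hm (by omega)
    · rw [hi, List.drop_length, List.foldl_nil]
  | succ n ih =>
    intro i b hn h1 h2 hb hP hmax
    by_cases hi : i = (d :: l).length
    · refine ⟨b, by omega, hP, ?_, ?_⟩
      · intro m hm hml; exact hmax m hm (by omega)
      · rw [hi, List.drop_length, List.foldl_nil]
    · have hil : i < (d :: l).length := by omega
      rw [List.drop_eq_getElem_cons hil, List.foldl_cons]
      have hne : pvJoinTake (d :: l) i ≠ [] := pvJoinTake_ne d hd l i h1
      have hstep : pvStepA e (pvJoinTake (d :: l) i, pvJoinTake (d :: l) b) ((d :: l)[i]) =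
          (pvJoinTake (d :: l) (i + 1),
            if PySem.Chars.isIn (pvJoinTake (d :: l) (i + 1)) e then pvJoinTake (d :: l) (i + 1)
            else pvJoinTake (d :: l) b) := by
        simp only [pvStepA, PySem.Chars.len]
        rw [if_neg (by simpa using hne), ← pvJoinTake_succ (d :: l) i h1 hil]
      rw [hstep]
      by_cases hc : PySem.Chars.isIn (pvJoinTake (d :: l) (i + 1)) e = true
      · rw [if_pos hc]
        exact ih (i + 1) (i + 1) (by omega) (by omega) (by omega) (by omega) hc
          (fun m hm hml => by omega)
      · rw [if_neg hc]
        refine ih (i + 1) b (by omega) (by omega) (by omega) (by omega) hP ?_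
        intro m hm hml
        by_cases hmi : m ≤ i
        · exact hmax m hm hmi
        · have : m = i + 1 := by omega
          subst this
          exact Bool.not_eq_true _ ▸ (by simpa using hc)

theorem pvDropWhileHead {α : Type} (p : α → Bool) (L : List α) (d : α) (l : List α)
    (h : L.dropWhile p = d :: l) : p d = false := by
  induction L with
  | nil => simp at h
  | cons x xs ih =>
    rw [List.dropWhile_cons] at h
    by_cases hx : p x = true
    · rw [if_pos hx] at h; exact ih h
    · rw [if_neg hx] at h
      cases h
      exact Bool.of_not_eq_true hx

theorem pvA_common (e cs : List Char) :
    ∃ K, K ≤ ((PySem.Chars.splitOn cs [' ']).dropWhile (fun w => w == [])).length ∧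
      PySem.Chars.isIn (pvJoinTake ((PySem.Chars.splitOn cs [' ']).dropWhile (fun w => w == [])) K) e = true ∧
      (∀ m, K < m → m ≤ ((PySem.Chars.splitOn cs [' ']).dropWhile (fun w => w == [])).length →
        PySem.Chars.isIn (pvJoinTake ((PySem.Chars.splitOn cs [' ']).dropWhile (fun w => w == [])) m) e = false) ∧
      ((PySem.Chars.splitOn cs [' ']).foldl (pvStepA e) ([], [])).2
        = pvJoinTake ((PySem.Chars.splitOn cs [' ']).dropWhile (fun w => w == [])) K := by
  have hfold : ((PySem.Chars.splitOn cs [' ']).foldl (pvStepA e) ([], []))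
      = (((PySem.Chars.splitOn cs [' ']).dropWhile (fun w => w == [])).foldl (pvStepA e) ([], [])) := by
    conv_lhs => rw [← List.takeWhile_append_dropWhile (p := fun w => w == [])
      (l := PySem.Chars.splitOn cs [' '])]
    rw [List.foldl_append, pvFoldNil e _ (fun w hw => by simpa using List.mem_takeWhile_imp hw)]
  rw [hfold]
  generalize hds : (PySem.Chars.splitOn cs [' ']).dropWhile (fun w => w == []) = ds
  cases ds with
  | nil =>
    refine ⟨0, by simp, by simp [pvJoinTake, PySem.Chars.isIn_nil],
      fun m hm hml => by simp at hml; exact absurd hm (by omega), ?_⟩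
    simp [pvJoinTake, PySem.Chars.join_nil]
  | cons d l =>
    have hdne : d ≠ [] := by
      simpa using pvDropWhileHead (fun w => w == []) (PySem.Chars.splitOn cs [' ']) d l hds
    have h1 : pvStepA e ([], []) d = (pvJoinTake (d :: l) 1,
        if PySem.Chars.isIn (pvJoinTake (d :: l) 1) e then pvJoinTake (d :: l) 1
        else pvJoinTake (d :: l) 0) := by
      simp [pvStepA, pvJoinTake, PySem.Chars.len, PySem.Chars.join_singleton,
        PySem.Chars.join_nil]
    rw [List.foldl_cons, h1]
    have hP1 : pvJoinTake (d :: l) 1 = d := by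
      simp [pvJoinTake, PySem.Chars.join_singleton]
    by_cases hc : PySem.Chars.isIn (pvJoinTake (d :: l) 1) e = true
    · rw [if_pos hc]
      have spec := pvFold_spec e d hdne l (d :: l).length 1 1 (by omega) (le_refl 1)
        (by simp) (le_refl 1) hc (fun m hm hml => absurd (by omega : m ≤ 0) (by omega))
      simpa using spec
    · rw [if_neg hc]
      have hc' : PySem.Chars.isIn (pvJoinTake (d :: l) 1) e = false := Bool.of_not_eq_true hc
      have hP0 : PySem.Chars.isIn (pvJoinTake (d :: l) 0) e = true := by
        simp [pvJoinTake, PySem.Chars.join_nil, PySem.Chars.isIn_nil]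
      have spec := pvFold_spec e d hdne l (d :: l).length 1 0 (by omega) (le_refl 1)
        (by simp) (by omega) hP0 ?_
      · simpa using spec
      · intro m hm hml
        have : m = 1 := by omega
        subst this
        exact hc'

theorem pvCommon_eq (e cs : List Char) :
    ((PySem.Chars.splitOn cs [' ']).foldl (pvStepA e) ([], [])).2 =
      pvJoinTake ((PySem.Chars.splitOn cs [' ']).dropWhile (fun w => w == []))
        (pvSearch e ((PySem.Chars.splitOn cs [' ']).dropWhile (fun w => w == [])) 0
          ((PySem.Chars.splitOn cs [' ']).dropWhile (fun w => w == [])).length) := by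
  obtain ⟨KA, hKAl, hKAP, hKAmax, hA⟩ := pvA_common e cs
  set ws := (PySem.Chars.splitOn cs [' ']).dropWhile (fun w => w == []) with hws
  obtain ⟨hBP, hBl, hBmax⟩ := pvSearch_spec e ws ws.length 0 ws.length (by omega) (by omega)
    (le_refl _) (by simp [pvJoinTake, PySem.Chars.join_nil, PySem.Chars.isIn_nil])
    (fun m hm hml => by omega)
  have hEq : KA = pvSearch e ws 0 ws.length := by
    rcases Nat.lt_trichotomy KA (pvSearch e ws 0 ws.length) with h | h | h
    · have hf := hKAmax _ h hBl
      rw [hf] at hBP; simp at hBP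
    · exact h
    · have hf := hBmax _ h hKAl
      rw [hf] at hKAP; simp at hKAP
  rw [hA, hEq]

-- ===== VERDICT (by name: the statement is the Claim_ definition above) =====
theorem process_target_node_spec : Claim_equal_process_target_node := by
  intro node2 edge _
  exact congrArg (fun c => String.ofList (PySem.Chars.replace node2.toList c []))
    (pvCommon_eq edge.toList node2.toList)
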